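-- pv_equiv track=rewrite | github.com/ktalanda/algoexpert | task_assignement.py | taskAssignment
-- ===== SOURCE A (Python) =====
-- def taskAssignment(k, tasks):
--     indexedTask = []
--     for i in range(len(tasks)):
--         indexedTask.append((tasks[i], i))
--     indexedTask.sort()
--     result = []
--     for i in range(k):
--         result.append((indexedTask[i][1], indexedTask[-(i + 1)][1]))
--     return result
-- ===== SOURCE B (Python) =====
-- def taskAssignment(k, tasks):
--     # Bucket the original indices by duration, sort only the distinct durations,
--     # then walk two pointers: pop fronts of the smallest bucket, backs of the largest.
--     buckets = {}
--     for i, t in enumerate(tasks):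
--         buckets.setdefault(t, []).append(i)
--     durations = sorted(buckets)
--     result = []
--     lo = 0
--     hi = len(durations) - 1
--     small = buckets[durations[lo]][:] if durations else []
--     large = buckets[durations[hi]][:] if durations else []
--     for _ in range(k):
--         if not small:
--             lo += 1
--             small = buckets[durations[lo]][:]
--         if not large:
--             hi -= 1
--             large = buckets[durations[hi]][:]
--         result.append((small.pop(0), large.pop()))
--     return result
-- ===== Notes on version B (the rewrite author's own statement) =====
-- stated objective: alternative
-- what changed: Instead of sorting the full list of (duration, index) tuples and indexing it from both ends, B builds a dict bucketing each duration's original indices, sorts only the distinct durations, and forms the k pairs with a two-pointer walk that pops from the front of the current smallest bucket and the back of the current largest bucket.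
import Mathlib
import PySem

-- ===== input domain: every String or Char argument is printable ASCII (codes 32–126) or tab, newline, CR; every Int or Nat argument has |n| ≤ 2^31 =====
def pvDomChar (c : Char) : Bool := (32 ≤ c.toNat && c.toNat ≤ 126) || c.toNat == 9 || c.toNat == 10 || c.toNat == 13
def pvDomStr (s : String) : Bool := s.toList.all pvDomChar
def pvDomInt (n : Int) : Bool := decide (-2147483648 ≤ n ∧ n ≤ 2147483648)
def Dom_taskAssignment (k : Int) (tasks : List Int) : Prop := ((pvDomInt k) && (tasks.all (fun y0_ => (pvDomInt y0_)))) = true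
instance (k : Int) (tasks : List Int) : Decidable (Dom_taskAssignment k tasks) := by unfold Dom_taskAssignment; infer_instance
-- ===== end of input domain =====

-- B replaces A's full sort of (duration, index) tuples indexed from both ends by a dict of
-- per-duration index buckets, a sort of the distinct durations only, and a two-pointer walk
-- popping fronts of the smallest bucket and backs of the largest (objective: alternative).

-- ===== PORT A =====
def taskAssignment (k : Int) (tasks : List Int) : List (Int × Int) :=
  let indexedTask := (PySem.List.pyRange 0 (PySem.List.len tasks) 1).foldl
    (fun acc i => acc ++ [(PySem.List.pyGetD tasks i 0, i)]) []
  let sortedTask := PySem.List.sorted2 indexedTask (fun p => p.1) (fun p => p.2) false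
  (PySem.List.pyRange 0 k 1).foldl
    (fun acc i => acc ++ [((PySem.List.pyGetD sortedTask i (0, 0)).2,
                           (PySem.List.pyGetD sortedTask (-(i + 1)) (0, 0)).2)]) []

-- ===== PORT B =====
-- the body of Source B's 'for _ in range(k)' loop; small.pop(0) / large.pop() raise IndexError
-- only outside Pre_ (k > len(tasks)), so their total stand-ins headD/tail, getLastD/dropLast
-- are exact on Pre_
def pvStep (bkt : Int → List Int) (durs : List Int)
    (s : Int × Int × List Int × List Int × List (Int × Int)) (_i : Int) :
    Int × Int × List Int × List Int × List (Int × Int) :=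
  let lo := s.1
  let hi := s.2.1
  let small := s.2.2.1
  let large := s.2.2.2.1
  let res := s.2.2.2.2
  let ls : Int × List Int :=
    if small = [] then (lo + 1, bkt (PySem.List.pyGetD durs (lo + 1) 0)) else (lo, small)
  let hl : Int × List Int :=
    if large = [] then (hi - 1, bkt (PySem.List.pyGetD durs (hi - 1) 0)) else (hi, large)
  (ls.1, hl.1, ls.2.tail, hl.2.dropLast, res ++ [(ls.2.headD 0, hl.2.getLastD 0)])

def taskAssignment_alt (k : Int) (tasks : List Int) : List (Int × Int) :=
  let buckets : PySem.Dict Int (List Int) := (PySem.List.enumerate tasks).foldl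
    (fun dd p => dd.modify p.2 [] (fun l => l ++ [p.1])) PySem.Dict.empty
  let durations := PySem.List.sorted buckets.keys (fun x => x) false
  let lo : Int := 0
  let hi : Int := PySem.List.len durations - 1
  let small := if durations = [] then [] else buckets.getD (PySem.List.pyGetD durations lo 0) []
  let large := if durations = [] then [] else buckets.getD (PySem.List.pyGetD durations hi 0) []
  ((PySem.List.pyRange 0 k 1).foldl (pvStep (fun d => buckets.getD d []) durations)
    (lo, hi, small, large, [])).2.2.2.2

-- ===== PRECONDITION & SPEC =====
-- Pre_ excludes k > len(tasks), on which A raises IndexError.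
def Pre_taskAssignment (k : Int) (tasks : List Int) : Prop := k ≤ (tasks.length : Int)
instance (k : Int) (tasks : List Int) : Decidable (Pre_taskAssignment k tasks) := by unfold Pre_taskAssignment; infer_instance

def pvWitness_taskAssignment : Int × List Int := (2, [5, 1, 1, 4])

def Spec_taskAssignment (k : Int) (tasks : List Int) (out : List (Int × Int)) : Prop := out = taskAssignment_alt k tasks
instance (k : Int) (tasks : List Int) (out : List (Int × Int)) : Decidable (Spec_taskAssignment k tasks out) := by unfold Spec_taskAssignment; infer_instance

-- ===== CLAIM (what is proved, stated in full; the proofs are below) =====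
def Claim_equal_taskAssignment : Prop := ∀ (k : Int) (tasks : List Int), Dom_taskAssignment k tasks → Pre_taskAssignment k tasks → Spec_taskAssignment k tasks (taskAssignment k tasks)

-- ===== LEMMAS AND PROOFS =====

-- proof-side names for the data B builds
def bucketOf (tasks : List Int) (d : Int) : List Int :=
  (PySem.List.pyRange 0 (tasks.length : Int) 1).filter (fun j => PySem.List.pyGetD tasks j 0 == d)
def dursOf (tasks : List Int) : List Int :=
  PySem.List.sorted (PySem.Set.ofList tasks) (fun x => x) false
def flatOf (tasks : List Int) : List Int := (dursOf tasks).flatMap (bucketOf tasks)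
def idxOrder (tasks : List Int) : List Int :=
  PySem.List.sorted (PySem.List.pyRange 0 (tasks.length : Int) 1)
    (fun i => PySem.List.pyGetD tasks i 0) false

-- the strict "sort by key, ties by original position" order that stability realises
def lexRel (key : Int → Int) (a b : Int) : Prop := key a < key b ∨ (key a = key b ∧ a < b)

-- inserting an element larger (in original position) than everything present keeps lexRel-sortedness
lemma insertBy_lexRel (key : Int → Int) (x : Int) (acc : List Int)
    (hp : acc.Pairwise (lexRel key)) (hlt : ∀ a ∈ acc, a < x) :
    (PySem.List.insertBy (fun a b => decide (key a < key b)) x acc).Pairwise (lexRel key) := by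
  induction acc with
  | nil => simp [PySem.List.insertBy]
  | cons y ys ih =>
    rw [PySem.List.insertBy]
    by_cases h : key x < key y
    · simp only [h, decide_true, if_true]
      constructor
      · intro z hz
        rcases List.mem_cons.mp hz with hz | hz
        · subst hz; exact Or.inl h
        · rcases (List.pairwise_cons.mp hp).1 z hz with h' | h'
          · exact Or.inl (lt_of_lt_of_le h (le_of_lt h'))
          · exact Or.inl (lt_of_lt_of_eq h h'.1)
      · exact hp
    · simp only [h, decide_false, Bool.false_eq_true, if_false]
      have hp' := List.pairwise_cons.mp hp
      constructor
      · intro z hz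
        rcases (PySem.List.mem_insertBy _ _ _ _).mp hz with hz | hz
        · subst hz
          rcases lt_trichotomy (key y) (key z) with h' | h' | h'
          · exact Or.inl h'
          · exact Or.inr ⟨h', hlt y (List.mem_cons_self)⟩
          · exact absurd h' h
        · exact hp'.1 z hz
      · exact ih hp'.2 (fun a ha => hlt a (List.mem_cons_of_mem _ ha))

-- stability of PySem's sort on a strictly increasing input, as a Pairwise statement
lemma sorted_pairwise_lexRel (key : Int → Int) (xs : List Int) (hxs : xs.Pairwise (· < ·)) :
    (PySem.List.sorted xs key false).Pairwise (lexRel key) := by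
  rw [PySem.List.sorted_eq_foldl_insertBy]
  suffices h : ∀ (l : List Int) (acc : List Int), l.Pairwise (· < ·) →
      acc.Pairwise (lexRel key) → (∀ a ∈ acc, ∀ b ∈ l, a < b) →
      (l.foldl (fun acc x => PySem.List.insertBy (fun a b => decide (key a < key b)) x acc) acc).Pairwise (lexRel key) by
    exact h xs [] hxs (by simp) (by simp)
  intro l
  induction l with
  | nil => intro acc _ hacc _; simpa using hacc
  | cons x t ih =>
    intro acc hl hacc hlt
    have hl' := List.pairwise_cons.mp hl
    simp only [List.foldl_cons]
    refine ih _ hl'.2 (insertBy_lexRel key x acc hacc (fun a ha => hlt a ha x (by simp))) ?_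
    intro a ha b hb
    rcases (PySem.List.mem_insertBy _ _ _ _).mp ha with ha | ha
    · subst ha; exact hl'.1 b hb
    · exact hlt a ha b (by simp [hb])

-- Python's tuple sort of pairs is PySem's sort under the lexicographic order on Int × Int
lemma sorted2_pairs_eq (xs : List (Int × Int)) :
    PySem.List.sorted2 xs (fun p => p.1) (fun p => p.2) false
      = PySem.List.sorted xs (fun p => toLex p) false := by
  rw [PySem.List.sorted_eq_foldl_insertBy]
  have hcmp : (fun (a b : Int × Int) => (decide (a.1 < b.1) || (!decide (b.1 < a.1) && decide (a.2 < b.2))))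
      = (fun (a b : Int × Int) => decide (toLex a < toLex b)) := by
    funext a b
    by_cases h1 : a.1 < b.1 <;> by_cases h2 : b.1 < a.1 <;> by_cases h3 : a.2 < b.2 <;>
      simp [h1, h2, h3, Prod.Lex.lt_iff] <;> omega
  simp only [PySem.List.sorted2, if_neg (by decide : ¬ (false = true)), hcmp]

-- index of the sorted tuple list below the sorted index list
lemma sortedTask_eq_map (tasks : List Int) :
    PySem.List.sorted2 ((PySem.List.pyRange 0 (tasks.length : Int) 1).map
        (fun j => (PySem.List.pyGetD tasks j 0, j))) (fun p => p.1) (fun p => p.2) false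
      = (idxOrder tasks).map (fun j => (PySem.List.pyGetD tasks j 0, j)) := by
  rw [sorted2_pairs_eq]
  apply PySem.List.sorted_eq_of_perm_of_pairwise_lt
  · exact (PySem.List.sorted_perm _ _ _).map _
  · rw [List.pairwise_map]
    have h := sorted_pairwise_lexRel (fun i => PySem.List.pyGetD tasks i 0)
      (PySem.List.pyRange 0 (tasks.length : Int) 1) (PySem.List.pairwise_lt_pyRange_one 0 _)
    refine h.imp ?_
    intro a b hab
    rw [Prod.Lex.lt_iff]
    exact hab

-- python xs[-(i+1)] for 0 ≤ i, i+1 ≤ len xs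
lemma pyGetD_neg_succ {α : Type} (xs : List α) (i : Nat) (d : α) (h : i + 1 ≤ xs.length) :
    PySem.List.pyGetD xs (-((i : Int) + 1)) d = xs.getD (xs.length - (i + 1)) d := by
  simp only [PySem.List.pyGetD, PySem.List.pyGet?, PySem.List.pyIdx?]
  rw [if_neg (by omega), if_pos (by omega)]
  have : (-(-((i : Int) + 1))).toNat = i + 1 := by omega
  rw [this]
  rfl

-- A in closed form: the first k of the stable index order, zipped with the first k of its reverse
lemma A_closed (k : Int) (tasks : List Int) (hk : 0 < k) (hpre : k ≤ (tasks.length : Int)) :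
    taskAssignment k tasks
      = ((idxOrder tasks).take k.toNat).zip (((idxOrder tasks).reverse).take k.toNat) := by
  unfold taskAssignment
  simp only [PySem.List.len_eq, PySem.List.foldl_append_singleton_eq_map, List.nil_append,
    sortedTask_eq_map]
  set key : Int → Int := fun i => PySem.List.pyGetD tasks i 0 with hkey
  set order := idxOrder tasks with horder
  have hlen : order.length = tasks.length := by
    rw [horder, idxOrder, PySem.List.length_sorted, PySem.List.length_pyRange_one]; omega
  apply List.ext_getElem
  · simp only [List.length_map, PySem.List.length_pyRange_one, List.length_zip,
      List.length_take, List.length_reverse, hlen]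
    omega
  · intro i h1 h2
    have hik : i < k.toNat := by
      simp only [List.length_map, PySem.List.length_pyRange_one] at h1
      omega
    have hin : i < tasks.length := by omega
    rw [List.getElem_map, PySem.List.getElem_pyRange_one]
    rw [List.getElem_zip, List.getElem_take, List.getElem_take, List.getElem_reverse]
    have e1 : PySem.List.pyGetD (order.map (fun j => (key j, j))) (0 + (i : Int)) (0, 0)
        = (key order[i], order[i]) := by
      rw [zero_add, PySem.List.pyGetD_natCast, List.getD_eq_getElem _ _ (by simp [hlen]; omega),
        List.getElem_map]
    have e2 : PySem.List.pyGetD (order.map (fun j => (key j, j))) (-((0 : Int) + (i : Int) + 1)) (0, 0)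
        = (key order[tasks.length - (i + 1)], order[tasks.length - (i + 1)]) := by
      rw [zero_add]
      rw [pyGetD_neg_succ _ i _ (by simp only [List.length_map, hlen]; omega)]
      simp only [List.length_map, hlen]
      rw [List.getD_eq_getElem _ _ (by simp only [List.length_map, hlen]; omega), List.getElem_map]
    rw [e1, e2]
    simp only [Prod.mk.injEq, true_and]
    exact getElem_congr_idx (by simp only [hlen]; omega)

-- B's buckets dict looked up at any duration is the ascending index bucket
lemma getD_bucketsOf (tasks : List Int) (d : Int) :
    ((PySem.List.enumerate tasks).foldl
        (fun dd p => dd.modify p.2 [] (fun l => l ++ [p.1])) PySem.Dict.empty).getD d []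
      = bucketOf tasks d := by
  rw [PySem.List.enumerate_eq_map_pyRange tasks 0, List.foldl_map]
  rw [← List.foldl_map (f := fun j => (PySem.List.pyGetD tasks j 0, j))
        (g := fun (dd : PySem.Dict Int (List Int)) p => dd.modify p.1 [] (fun l => l ++ [p.2]))]
  rw [PySem.Dict.getD_foldl_modify_append]
  simp only [PySem.Dict.getD_empty, List.nil_append, List.filter_map, List.map_map,
    PySem.List.len_eq]
  simp [bucketOf, Function.comp_def]

-- B's sorted key list is the sorted distinct durations
lemma durs_bucketsOf (tasks : List Int) :
    PySem.List.sorted ((PySem.List.enumerate tasks).foldl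
        (fun dd p => dd.modify p.2 [] (fun l => l ++ [p.1])) PySem.Dict.empty).keys
      (fun x => x) false = dursOf tasks := by
  rw [PySem.Dict.keys_foldl_modify_key (PySem.List.enumerate tasks) (fun p => p.2) []
        (fun _ p => (fun l => l ++ [p.1]))]
  rw [PySem.Dict.keys_empty, PySem.Set.update_nil_left, PySem.List.map_snd_enumerate]
  rfl

lemma mem_dursOf (tasks : List Int) (d : Int) : d ∈ dursOf tasks ↔ d ∈ tasks := by
  rw [dursOf, (PySem.List.sorted_perm _ _ _).mem_iff, PySem.Set.mem_ofList]

lemma dursOf_pairwise (tasks : List Int) : (dursOf tasks).Pairwise (· < ·) := by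
  have hnd : (dursOf tasks).Nodup :=
    (PySem.List.sorted_perm _ _ _).nodup_iff.mpr (PySem.Set.nodup_ofList tasks)
  have hle : (dursOf tasks).Pairwise (· ≤ ·) := PySem.List.sorted_pairwise _ _
  exact (hle.and hnd).imp (fun h => lt_of_le_of_ne h.1 h.2)

lemma mem_bucketOf (tasks : List Int) (d j : Int) :
    j ∈ bucketOf tasks d ↔ j ∈ PySem.List.pyRange 0 (tasks.length : Int) 1 ∧
      PySem.List.pyGetD tasks j 0 = d := by
  simp [bucketOf, List.mem_filter]

lemma bucketOf_ne_nil (tasks : List Int) (d : Int) (hd : d ∈ dursOf tasks) :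
    bucketOf tasks d ≠ [] := by
  rw [mem_dursOf] at hd
  obtain ⟨m, hm, rfl⟩ := List.getElem_of_mem hd
  have : (m : Int) ∈ bucketOf tasks tasks[m] := by
    rw [mem_bucketOf]
    refine ⟨?_, ?_⟩
    · rw [PySem.List.mem_pyRange_one]; omega
    · rw [PySem.List.pyGetD_natCast, List.getD_eq_getElem _ _ hm]
  exact List.ne_nil_of_mem this

lemma flatOf_pairwise (tasks : List Int) :
    (flatOf tasks).Pairwise (lexRel (fun i => PySem.List.pyGetD tasks i 0)) := by
  rw [flatOf, List.flatMap_def, List.pairwise_flatten]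
  constructor
  · intro l hl
    rw [List.mem_map] at hl
    obtain ⟨d, _, rfl⟩ := hl
    have hbase : (bucketOf tasks d).Pairwise (· < ·) :=
      (PySem.List.pairwise_lt_pyRange_one 0 _).filter _
    refine hbase.imp_of_mem ?_
    intro a b ha hb hab
    rw [mem_bucketOf] at ha hb
    exact Or.inr ⟨ha.2.trans hb.2.symm, hab⟩
  · rw [List.pairwise_map]
    refine (dursOf_pairwise tasks).imp_of_mem ?_
    intro d1 d2 _ _ h12 x hx y hy
    rw [mem_bucketOf] at hx hy
    refine Or.inl (show PySem.List.pyGetD tasks x 0 < PySem.List.pyGetD tasks y 0 from ?_)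
    rw [hx.2, hy.2]; exact h12

lemma flatOf_perm (tasks : List Int) :
    (flatOf tasks).Perm (PySem.List.pyRange 0 (tasks.length : Int) 1) := by
  have hnd : (flatOf tasks).Nodup :=
    (flatOf_pairwise tasks).imp (fun h => by
      rcases h with h | h
      · rintro rfl; omega
      · rintro rfl; omega)
  rw [List.perm_ext_iff_of_nodup hnd (PySem.List.nodup_pyRange_one 0 _ )]
  intro j
  rw [flatOf, List.mem_flatMap]
  constructor
  · rintro ⟨d, _, hj⟩
    exact ((mem_bucketOf tasks d j).mp hj).1
  · intro hj
    refine ⟨PySem.List.pyGetD tasks j 0, ?_, ?_⟩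
    · rw [mem_dursOf]
      have hj' := (PySem.List.mem_pyRange_one).mp hj
      rw [PySem.List.pyGetD_eq_getElem _ _ hj'.1 (by simpa using hj'.2)]
      exact List.getElem_mem _
    · rw [mem_bucketOf]; exact ⟨hj, rfl⟩

-- the concatenation of the buckets in duration order IS the stable sorted index order
lemma flatOf_eq_idxOrder (tasks : List Int) : flatOf tasks = idxOrder tasks := by
  have h1 : PySem.List.sorted (PySem.List.pyRange 0 (tasks.length : Int) 1)
      (fun j => toLex (PySem.List.pyGetD tasks j 0, j)) false = flatOf tasks := by
    apply PySem.List.sorted_eq_of_perm_of_pairwise_lt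
    · exact flatOf_perm tasks
    · refine (flatOf_pairwise tasks).imp ?_
      intro a b hab
      rw [Prod.Lex.lt_iff]
      exact hab
  have h2 : PySem.List.sorted (PySem.List.pyRange 0 (tasks.length : Int) 1)
      (fun j => toLex (PySem.List.pyGetD tasks j 0, j)) false = idxOrder tasks := by
    apply PySem.List.sorted_eq_of_perm_of_pairwise_lt
    · exact PySem.List.sorted_perm _ _ _
    · refine (sorted_pairwise_lexRel (fun i => PySem.List.pyGetD tasks i 0) _
        (PySem.List.pairwise_lt_pyRange_one 0 _)).imp ?_
      intro a b hab
      rw [Prod.Lex.lt_iff]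
      exact hab
  rw [← h1, h2]

lemma take_dropLast {α : Type} (F : List α) (m : Nat) (hm : m ≤ F.length) :
    (F.take m).dropLast = F.take (m - 1) := by
  rcases Nat.lt_or_ge m F.length with h | h
  · exact List.dropLast_take h
  · have : m = F.length := le_antisymm hm h
    subst this
    rw [List.take_length, List.dropLast_eq_take]

-- the two-pointer loop, characterised: it emits (flat[j], flat.reverse[j]) at step j
lemma loop_inv (bkt : Int → List Int) (durs : List Int)
    (hne : ∀ d ∈ durs, bkt d ≠ [])
    (F : List Int) (_hF : F = durs.flatMap bkt) :
    ∀ (l : List Int) (j : Nat) (lo hi : Int) (small large : List Int) (res : List (Int × Int)),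
    j + l.length ≤ F.length →
    0 ≤ lo →
    small ++ (durs.drop (lo.toNat + 1)).flatMap bkt = F.drop j →
    0 ≤ hi → hi.toNat ≤ durs.length →
    (durs.take hi.toNat).flatMap bkt ++ large = F.take (F.length - j) →
    (l.foldl (pvStep bkt durs) (lo, hi, small, large, res)).2.2.2.2
      = res ++ ((F.drop j).take l.length).zip ((F.reverse.drop j).take l.length) := by
  intro l
  induction l with
  | nil => intro j lo hi small large res _ _ _ _ _ _; simp
  | cons a l' ih =>
    intro j lo hi small large res hjl hlo hsmall hhi hhile hlarge
    have hjF : j < F.length := by simp at hjl; omega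
    -- resolve the small-side guard
    have hps : ∃ lo1 small1,
        (if small = [] then (lo + 1, bkt (PySem.List.pyGetD durs (lo + 1) 0)) else (lo, small))
          = (lo1, small1) ∧ 0 ≤ lo1 ∧ small1 ≠ [] ∧
          small1 ++ (durs.drop (lo1.toNat + 1)).flatMap bkt = F.drop j := by
      by_cases hs : small = []
      · subst hs
        rw [List.nil_append] at hsmall
        have hdropne : durs.drop (lo.toNat + 1) ≠ [] := by
          intro h
          rw [h] at hsmall
          have : (F.drop j).length = 0 := by rw [← hsmall]; rfl
          rw [List.length_drop] at this; omega
        have hlt : lo.toNat + 1 < durs.length := by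
          by_contra h
          exact hdropne (List.drop_eq_nil_of_le (by omega))
        have hget : PySem.List.pyGetD durs (lo + 1) 0 = durs[lo.toNat + 1] := by
          rw [PySem.List.pyGetD_eq_getElem _ _ (by omega) (by omega)]
          congr 1; omega
        refine ⟨lo + 1, bkt (PySem.List.pyGetD durs (lo + 1) 0), by simp, by omega, ?_, ?_⟩
        · rw [hget]; exact hne _ (List.getElem_mem _)
        · rw [hget]
          have : (lo + 1).toNat + 1 = lo.toNat + 2 := by omega
          rw [this, ← hsmall, List.drop_eq_getElem_cons hlt, List.flatMap_cons]
      · exact ⟨lo, small, by simp [hs], hlo, hs, hsmall⟩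
    -- resolve the large-side guard
    have hpl : ∃ hi1 large1,
        (if large = [] then (hi - 1, bkt (PySem.List.pyGetD durs (hi - 1) 0)) else (hi, large))
          = (hi1, large1) ∧ 0 ≤ hi1 ∧ hi1.toNat ≤ durs.length ∧ large1 ≠ [] ∧
          (durs.take hi1.toNat).flatMap bkt ++ large1 = F.take (F.length - j) := by
      by_cases hg : large = []
      · subst hg
        rw [List.append_nil] at hlarge
        have htakene : durs.take hi.toNat ≠ [] := by
          intro h
          rw [h] at hlarge
          have : (F.take (F.length - j)).length = 0 := by rw [← hlarge]; rfl
          rw [List.length_take] at this; omega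
        have h1 : 1 ≤ hi.toNat := by
          by_contra h
          have : hi.toNat = 0 := by omega
          rw [this] at htakene; exact htakene rfl
        have hget : PySem.List.pyGetD durs (hi - 1) 0 = durs[hi.toNat - 1] := by
          rw [PySem.List.pyGetD_eq_getElem _ _ (by omega) (by omega)]
          congr 1; omega
        refine ⟨hi - 1, bkt (PySem.List.pyGetD durs (hi - 1) 0), by simp, by omega, by omega, ?_, ?_⟩
        · rw [hget]; exact hne _ (List.getElem_mem _)
        · rw [hget]
          have hsplit : durs.take hi.toNat
              = durs.take (hi.toNat - 1) ++ [durs[hi.toNat - 1]] := by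
            have h2 : hi.toNat = (hi.toNat - 1) + 1 := by omega
            conv_lhs => rw [h2]
            rw [List.take_add_one, List.getElem?_eq_getElem (by omega)]
            rfl
          have h3 : (hi - 1).toNat = hi.toNat - 1 := by omega
          rw [h3, ← hlarge, hsplit, List.flatMap_append, List.flatMap_cons, List.flatMap_nil,
            List.append_nil]
      · exact ⟨hi, large, by simp [hg], hhi, hhile, hg, hlarge⟩
    obtain ⟨lo1, small1, hpeq, hlo1, hsne, hsm1⟩ := hps
    obtain ⟨hi1, large1, hqeq, hhi1, hhile1, hlne, hlg1⟩ := hpl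
    obtain ⟨s0, st, rfl⟩ := List.exists_cons_of_ne_nil hsne
    -- identify the two popped values
    have hdropj : F.drop j = F[j] :: F.drop (j + 1) := List.drop_eq_getElem_cons hjF
    have hs0 : s0 = F[j] ∧ st ++ (durs.drop (lo1.toNat + 1)).flatMap bkt = F.drop (j + 1) := by
      rw [hdropj, List.cons_append] at hsm1
      exact ⟨(List.cons.injEq _ _ _ _).mp hsm1 |>.1, (List.cons.injEq _ _ _ _).mp hsm1 |>.2⟩
    have hylast : large1.getLastD 0 = F.reverse[j]'(by simpa using hjF) := by
      have h1 : (durs.take hi1.toNat).flatMap bkt ++ large1 ≠ [] := by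
        simp [hlne]
      have : large1.getLast? = (F.take (F.length - j)).getLast? := by
        rw [← hlg1, List.getLast?_append_of_ne_nil _ hlne]
      rw [List.getLastD_eq_getLast?, this, List.getLast?_take]
      rw [if_neg (by omega), List.getElem?_eq_getElem (by omega)]
      simp only [Option.some_or, Option.getD_some]
      rw [List.getElem_reverse]
      exact getElem_congr_idx (by omega)
    have hdropLast : (durs.take hi1.toNat).flatMap bkt ++ large1.dropLast
        = F.take (F.length - (j + 1)) := by
      rw [← List.dropLast_append_of_ne_nil hlne, hlg1, take_dropLast F _ (by omega), Nat.sub_sub]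
    -- one step of the fold
    rw [List.foldl_cons]
    have hstep : pvStep bkt durs (lo, hi, small, large, res) a
        = (lo1, hi1, st, large1.dropLast, res ++ [(s0, large1.getLastD 0)]) := by
      simp only [pvStep, hpeq, hqeq, List.tail_cons, List.headD_cons]
    rw [hstep]
    rw [ih (j + 1) lo1 hi1 st large1.dropLast (res ++ [(s0, large1.getLastD 0)])
      (by simp at hjl ⊢; omega) hlo1 hs0.2 hhi1 hhile1 hdropLast]
    have hdropjr : F.reverse.drop j = F.reverse[j]'(by simpa using hjF) :: F.reverse.drop (j + 1) :=
      List.drop_eq_getElem_cons (by simpa using hjF)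
    rw [List.length_cons, hdropj, hdropjr, List.take_succ_cons, List.take_succ_cons,
      List.zip_cons_cons, hs0.1, ← hylast]
    simp

-- ===== VERDICT (by name: the statement is the Claim_ definition above) =====
theorem taskAssignment_spec : Claim_equal_taskAssignment := by
  intro k tasks _ hpre
  have hpre' : k ≤ (tasks.length : Int) := hpre
  unfold Spec_taskAssignment taskAssignment_alt
  simp only [getD_bucketsOf, durs_bucketsOf, PySem.List.len_eq]
  by_cases hk : k ≤ 0
  · -- no pairs on either side
    unfold taskAssignment
    simp only [PySem.List.pyRange_one_eq_nil hk]
    simp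
  · replace hk : 0 < k := by omega
    have hn : 0 < tasks.length := by omega
    have hdne : dursOf tasks ≠ [] := by
      have : tasks[0] ∈ dursOf tasks := (mem_dursOf tasks _).mpr (List.getElem_mem _)
      exact List.ne_nil_of_mem this
    have hdlen : 0 < (dursOf tasks).length := List.length_pos_of_ne_nil hdne
    rw [if_neg hdne, if_neg hdne]
    have hFlen : (flatOf tasks).length = tasks.length := by
      rw [(flatOf_perm tasks).length_eq, PySem.List.length_pyRange_one]; omega
    have hget0 : PySem.List.pyGetD (dursOf tasks) 0 0 = (dursOf tasks)[0] := by
      rw [PySem.List.pyGetD_eq_getElem _ _ (by omega) (by omega)]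
      rfl
    have hgetl : PySem.List.pyGetD (dursOf tasks) ((dursOf tasks).length - 1 : Int) 0
        = (dursOf tasks)[(dursOf tasks).length - 1] := by
      rw [PySem.List.pyGetD_eq_getElem _ _ (by omega) (by omega)]
      congr 1; omega
    rw [hget0, hgetl]
    rw [loop_inv (bucketOf tasks) (dursOf tasks) (fun d hd => bucketOf_ne_nil tasks d hd)
      (flatOf tasks) rfl (PySem.List.pyRange 0 k 1) 0 0 ((dursOf tasks).length - 1 : Int)
      _ _ []
      (by rw [PySem.List.length_pyRange_one]; omega)
      le_rfl
      (by
        have h0 : (0 : Int).toNat + 1 = 1 := by omega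
        rw [h0, List.drop_zero, ← List.flatMap_cons, ← List.drop_eq_getElem_cons hdlen]
        simp [flatOf])
      (by omega)
      (by omega)
      (by
        have ht : ((dursOf tasks).length - 1 : Int).toNat = (dursOf tasks).length - 1 := by
          omega
        rw [ht, Nat.sub_zero, List.take_length]
        have hsplit : dursOf tasks = (dursOf tasks).take ((dursOf tasks).length - 1)
            ++ [(dursOf tasks)[(dursOf tasks).length - 1]] := by
          conv_lhs => rw [← List.dropLast_append_getLast hdne]
          rw [List.dropLast_eq_take, List.getLast_eq_getElem]
        rw [flatOf]
        conv_rhs => rw [hsplit]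
        rw [List.flatMap_append, List.flatMap_cons, List.flatMap_nil, List.append_nil])]
    rw [List.nil_append, List.drop_zero, List.drop_zero, PySem.List.length_pyRange_one,
      Int.sub_zero]
    rw [A_closed k tasks hk hpre', flatOf_eq_idxOrder]
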